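-- pv_equiv track=rewrite | github.com/MrHamdulay/csc3-capstone | examples/data/Assignment_4/mznsha002/ndom.py | ndom_multiply
-- ===== SOURCE A (Python) =====
-- def ndom_multiply (a, b):
--
--     count_A=0
--     a = str(a)
--     num = len(a)
--     for i in (a):
--         num = num - 1
--         i = int(i)
--         count_A = count_A + (i*(6**num))
--
--     count_B = 0
--     b = str(b)
--     num = len(b)
--     for i in b:
--         num = num-1
--         i = int(i)
--         count_B = count_B + (i*(6**num))
--
--     total = count_A * count_B
--
--     divider = total
--     total_2 = ""
--     while divider != 0:
--         remainder = divider % 6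
--         divider = divider // 6
--         remainder = str(remainder)
--         total_2 = total_2 + remainder
--     return(total_2[::-1])
-- ===== SOURCE B (Python) =====
-- def ndom_multiply(a, b):
--     def addpoly(p, q):
--         if not p: return q
--         if not q: return p
--         return [p[0] + q[0]] + addpoly(p[1:], q[1:])
--     def polymul(p, q):  # little-endian coefficient lists: schoolbook long multiplication
--         if not p: return []
--         return addpoly([p[0] * y for y in q], [0] + polymul(p[1:], q))
--     def strip0(l):  # drop trailing zeros (the written number's leading zeros)
--         if not l: return []
--         s = strip0(l[1:])
--         if s: return [l[0]] + s
--         return [] if l[0] == 0 else [l[0]]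
--     ra = [int(ch) for ch in str(a)][::-1]
--     rb = [int(ch) for ch in str(b)][::-1]
--     out = []
--     carry = 0
--     for v in polymul(ra, rb):    # propagate carries in base 6
--         carry += v
--         out.append(carry % 6)
--         carry //= 6
--     while carry > 0:
--         out.append(carry % 6)
--         carry //= 6
--     out = strip0(out)
--     return ''.join(str(d) for d in reversed(out))
-- ===== Notes on version B (the rewrite author's own statement) =====
-- stated objective: alternative
-- what changed: B performs base-6 long multiplication directly on the digit lists (polynomial convolution of the little-endian digit lists followed by a carry-propagation pass and a leading-zero strip) and never forms or multiplies the two parsed integers; A converts each operand to one integer via 6**k power sums, multiplies the big integers, and converts back with a divmod loop.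
import Mathlib
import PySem

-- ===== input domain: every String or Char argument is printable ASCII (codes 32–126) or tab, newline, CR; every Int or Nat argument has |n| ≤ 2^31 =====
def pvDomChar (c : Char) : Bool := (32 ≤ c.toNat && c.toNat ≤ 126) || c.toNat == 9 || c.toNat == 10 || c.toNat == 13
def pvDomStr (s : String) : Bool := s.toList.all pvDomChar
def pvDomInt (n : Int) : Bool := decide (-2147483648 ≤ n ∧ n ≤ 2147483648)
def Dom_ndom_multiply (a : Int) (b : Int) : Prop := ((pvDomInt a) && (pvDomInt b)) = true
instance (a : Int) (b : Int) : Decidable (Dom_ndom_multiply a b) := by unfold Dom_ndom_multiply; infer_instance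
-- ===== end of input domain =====

-- B does base-6 long multiplication on the digit lists (convolution + carry propagation) and
-- never forms or multiplies the two parsed integers: a different algorithm, similar cost.

-- ===== PORT A =====

-- int(ch) for one character of str(x); exact: under Pre_ both operands are nonneg,
-- so str(x) consists only of '0'..'9'
def pvDigitVal (c : Char) : Int := (c.toNat : Int) - 48

-- str(remainder) for 0 ≤ remainder < 6: the single digit character
def pvDigitChar (r : Nat) : Char := Char.ofNat (48 + r)

-- A's while loop; divider is a product of the two nonneg counts, so running it on the
-- Nat value is exact (Python %/// agree with Nat %// for nonneg divider, divisor 6)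
def ndomLoopA (d : Nat) (t2 : List Char) : List Char :=
  if _h : d = 0 then t2
  else ndomLoopA (d / 6) (t2 ++ [pvDigitChar (d % 6)])
termination_by d
decreasing_by exact Nat.div_lt_self (Nat.pos_of_ne_zero _h) (by norm_num)

def ndom_multiply (a : Int) (b : Int) : String :=
  -- first for-loop: state (num, count_A), num decremented before 6**num is taken;
  -- num stays ≥ 0 (it starts at len and drops once per char), so (·).toNat is exact
  let as := (PySem.Int.toStr a).toList
  let countA := (as.foldl (fun (st : Int × Int) c =>
      (st.1 - 1, st.2 + pvDigitVal c * 6 ^ (st.1 - 1).toNat)) ((as.length : Int), 0)).2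
  let bs := (PySem.Int.toStr b).toList
  let countB := (bs.foldl (fun (st : Int × Int) c =>
      (st.1 - 1, st.2 + pvDigitVal c * 6 ^ (st.1 - 1).toNat)) ((bs.length : Int), 0)).2
  let total := countA * countB
  -- total_2[::-1] is string reversal
  String.mk (ndomLoopA total.toNat []).reverse

-- ===== PORT B =====

-- addpoly: digit-wise sum of two little-endian coefficient lists
def pvAddPoly : List Int → List Int → List Int
  | [], q => q
  | p, [] => p
  | x :: p, y :: q => (x + y) :: pvAddPoly p q

-- polymul: schoolbook convolution of little-endian coefficient lists
def pvPolyMul : List Int → List Int → List Int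
  | [], _ => []
  | x :: p, q => pvAddPoly (q.map (fun y => x * y)) (0 :: pvPolyMul p q)

-- the trailing 'while carry > 0' loop
def pvFlush (c : Int) : List Int :=
  if _h : c ≤ 0 then []
  else PySem.Int.mod c 6 :: pvFlush (PySem.Int.floordiv c 6)
termination_by c.toNat
decreasing_by
  have h1 : PySem.Int.floordiv c 6 < c :=
    (PySem.Int.floordiv_lt_iff_lt_mul (by omega)).2 (by omega)
  have h2 : (0:Int) ≤ PySem.Int.floordiv c 6 :=
    (PySem.Int.le_floordiv_iff_mul_le (by omega)).2 (by omega)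
  omega

-- the 'for v in polymul(ra, rb)' carry loop, then the flush loop
def pvCarryRun : Int → List Int → List Int
  | c, [] => pvFlush c
  | c, v :: t => PySem.Int.mod (c + v) 6 :: pvCarryRun (PySem.Int.floordiv (c + v) 6) t

-- strip0: drop trailing zeros (the written number's leading zeros)
def pvStrip0 : List Int → List Int
  | [] => []
  | d :: t =>
      let s := pvStrip0 t
      if s ≠ [] then d :: s else if d = 0 then [] else [d]

def ndom_multiply_alt (a : Int) (b : Int) : String :=
  let ra := (((PySem.Int.toStr a).toList).map pvDigitVal).reverse
  let rb := (((PySem.Int.toStr b).toList).map pvDigitVal).reverse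
  let out := pvStrip0 (pvCarryRun 0 (pvPolyMul ra rb))
  -- ''.join(str(d) for d in reversed(out))
  String.mk (out.reverse.flatMap (fun d => PySem.Int.toChars d))

-- ===== PRECONDITION & SPEC =====
-- Pre_ excludes negative operands: there str(x) starts with '-' and A's int(i) raises ValueError.
def Pre_ndom_multiply (a : Int) (b : Int) : Prop := 0 ≤ a ∧ 0 ≤ b
instance (a : Int) (b : Int) : Decidable (Pre_ndom_multiply a b) := by unfold Pre_ndom_multiply; infer_instance
def pvWitness_ndom_multiply : Int × Int := (25, 13)

def Spec_ndom_multiply (a : Int) (b : Int) (out : String) : Prop := out = ndom_multiply_alt a b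
instance (a : Int) (b : Int) (out : String) : Decidable (Spec_ndom_multiply a b out) := by unfold Spec_ndom_multiply; infer_instance

-- ===== CLAIM (what is proved, stated in full; the proofs are below) =====
def Claim_equal_ndom_multiply : Prop := ∀ (a : Int) (b : Int), Dom_ndom_multiply a b → Pre_ndom_multiply a b → Spec_ndom_multiply a b (ndom_multiply a b)

-- ===== LEMMAS AND PROOFS =====

-- the base-6 value of a little-endian coefficient list
def pvVal (l : List Int) : Int := l.foldr (fun d acc => d + 6 * acc) 0

theorem pvVal_nil : pvVal [] = 0 := rfl
theorem pvVal_cons (d : Int) (t : List Int) : pvVal (d :: t) = d + 6 * pvVal t := rfl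

-- A's Horner-like fold equals the value of the reversed digit list
def ndomParse (ds : List Char) : Int := ds.foldl (fun acc c => acc * 6 + pvDigitVal c) 0

theorem horner_shift (ds : List Char) : ∀ acc : Int,
    ds.foldl (fun acc c => acc * 6 + pvDigitVal c) acc
      = acc * 6 ^ ds.length + ds.foldl (fun acc c => acc * 6 + pvDigitVal c) 0 := by
  induction ds with
  | nil => intro acc; simp
  | cons d t ih =>
      intro acc
      simp only [List.foldl_cons, List.length_cons]
      rw [ih (acc * 6 + pvDigitVal d), ih (0 * 6 + pvDigitVal d)]
      ring

-- A's power-sum fold computes the Horner value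
theorem foldA_eq_parse (ds : List Char) : ∀ c : Int,
    (ds.foldl (fun (st : Int × Int) c =>
        (st.1 - 1, st.2 + pvDigitVal c * 6 ^ (st.1 - 1).toNat)) ((ds.length : Int), c)).2
      = c + ndomParse ds := by
  induction ds with
  | nil => intro c; simp [ndomParse]
  | cons d t ih =>
      intro c
      simp only [List.foldl_cons, List.length_cons]
      have h1 : ((t.length + 1 : Nat) : Int) - 1 = (t.length : Int) := by push_cast; ring
      rw [h1, Int.toNat_natCast, ih]
      simp only [ndomParse, List.foldl_cons]
      rw [horner_shift t (0 * 6 + pvDigitVal d)]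
      ring

theorem parse_eq_val (ds : List Char) :
    ndomParse ds = pvVal ((ds.map pvDigitVal).reverse) := by
  unfold ndomParse pvVal
  rw [List.foldr_reverse, List.foldl_map]
  have : (fun (acc : Int) (c : Char) => acc * 6 + pvDigitVal c)
       = (fun (acc : Int) (c : Char) => pvDigitVal c + 6 * acc) := by
    funext acc c; ring
  rw [this]

-- digits of str(n) for 0 ≤ n are '0'..'9', hence nonneg digit values
theorem toDigitsCore_digit_nonneg (f : Nat) : ∀ (m : Nat) (acc : List Char),
    (∀ c ∈ acc, 0 ≤ pvDigitVal c) →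
    ∀ c ∈ Nat.toDigitsCore 10 f m acc, 0 ≤ pvDigitVal c := by
  induction f with
  | zero => intro m acc hacc c hc; exact hacc c hc
  | succ f ih =>
      intro m acc hacc c hc
      have hd : 0 ≤ pvDigitVal (Nat.digitChar (m % 10)) := by
        have : m % 10 < 10 := Nat.mod_lt _ (by norm_num)
        interval_cases h : m % 10 <;> decide
      simp only [Nat.toDigitsCore] at hc
      by_cases h : m / 10 = 0
      · simp only [h, if_true] at hc
        rcases List.mem_cons.1 hc with h' | h'
        · subst h'; exact hd
        · exact hacc c h'
      · simp only [h, if_false] at hc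
        exact ih (m / 10) _ (by
          intro c' hc'
          rcases List.mem_cons.1 hc' with h' | h'
          · subst h'; exact hd
          · exact hacc c' h') c hc

theorem toStr_digit_nonneg (n : Int) (hn : 0 ≤ n) :
    ∀ c ∈ (PySem.Int.toStr n).toList, 0 ≤ pvDigitVal c := by
  intro c hc
  rw [PySem.Int.toList_toStr] at hc
  unfold PySem.Int.toChars at hc
  rw [if_neg (by omega)] at hc
  exact toDigitsCore_digit_nonneg _ _ [] (by simp) c hc

theorem pvVal_nonneg (l : List Int) (h : ∀ d ∈ l, 0 ≤ d) : 0 ≤ pvVal l := by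
  induction l with
  | nil => simp [pvVal]
  | cons d t ih =>
      rw [pvVal_cons]
      have h1 := h d List.mem_cons_self
      have h2 := ih (fun x hx => h x (List.mem_cons_of_mem _ hx))
      omega

theorem pvAddPoly_nonneg (p : List Int) : ∀ (q : List Int),
    (∀ x ∈ p, 0 ≤ x) → (∀ y ∈ q, 0 ≤ y) → ∀ z ∈ pvAddPoly p q, 0 ≤ z := by
  induction p with
  | nil => intro q _ hq z hz; exact hq z hz
  | cons x p ih =>
      intro q hp hq z hz
      cases q with
      | nil => exact hp z hz
      | cons y q =>
          simp only [pvAddPoly] at hz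
          rcases List.mem_cons.1 hz with h' | h'
          · subst h'
            have := hp x List.mem_cons_self
            have := hq y List.mem_cons_self
            omega
          · exact ih q (fun u hu => hp u (List.mem_cons_of_mem _ hu))
              (fun u hu => hq u (List.mem_cons_of_mem _ hu)) z h'

theorem pvPolyMul_nonneg (p : List Int) : ∀ (q : List Int),
    (∀ x ∈ p, 0 ≤ x) → (∀ y ∈ q, 0 ≤ y) → ∀ z ∈ pvPolyMul p q, 0 ≤ z := by
  induction p with
  | nil => intro q _ _ z hz; simp [pvPolyMul] at hz
  | cons x p ih =>
      intro q hp hq z hz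
      simp only [pvPolyMul] at hz
      refine pvAddPoly_nonneg _ _ ?_ ?_ z hz
      · intro u hu
        rcases List.mem_map.1 hu with ⟨y, hy, rfl⟩
        exact mul_nonneg (hp x List.mem_cons_self) (hq y hy)
      · intro u hu
        rcases List.mem_cons.1 hu with h' | h'
        · omega
        · exact ih q (fun v hv => hp v (List.mem_cons_of_mem _ hv)) hq u h'

-- value preservation of the convolution
theorem pvVal_addPoly (p : List Int) : ∀ q : List Int,
    pvVal (pvAddPoly p q) = pvVal p + pvVal q := by
  induction p with
  | nil => intro q; simp [pvAddPoly, pvVal]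
  | cons x p ih =>
      intro q
      cases q with
      | nil => simp [pvAddPoly, pvVal]
      | cons y q =>
          simp only [pvAddPoly, pvVal_cons, ih]
          ring

theorem pvVal_map_mul (x : Int) (q : List Int) :
    pvVal (q.map (fun y => x * y)) = x * pvVal q := by
  induction q with
  | nil => simp [pvVal]
  | cons y q ih => simp only [List.map_cons, pvVal_cons, ih]; ring

theorem pvVal_polyMul (p : List Int) : ∀ q : List Int,
    pvVal (pvPolyMul p q) = pvVal p * pvVal q := by
  induction p with
  | nil => intro q; simp [pvPolyMul, pvVal]
  | cons x p ih =>
      intro q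
      simp only [pvPolyMul, pvVal_addPoly, pvVal_map_mul, pvVal_cons, ih]
      ring

-- pvFlush c = [] exactly when c ≤ 0
theorem pvFlush_eq_nil (c : Int) (h : c ≤ 0) : pvFlush c = [] := by
  rw [pvFlush]; simp [h]

theorem pvFlush_ne_nil (c : Int) (h : 0 < c) : pvFlush c ≠ [] := by
  rw [pvFlush]; simp [show ¬ c ≤ 0 by omega]

-- the flush loop writes digits of value c (nonneg), each in [0, 6)
theorem pvFlush_val_aux : ∀ (n : Nat) (c : Int), c.toNat ≤ n → 0 ≤ c →
    pvVal (pvFlush c) = c := by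
  intro n
  induction n with
  | zero =>
      intro c h1 h2
      have : c = 0 := by omega
      subst this
      rw [pvFlush_eq_nil 0 le_rfl, pvVal_nil]
  | succ n ih =>
      intro c h1 h2
      rw [pvFlush]
      split_ifs with h
      · rw [pvVal_nil]; omega
      · have hm := PySem.Int.mod_eq_emod_of_pos (a := c) (b := 6) (by norm_num)
        have hd := PySem.Int.floordiv_eq_ediv_of_pos (a := c) (b := 6) (by norm_num)
        rw [pvVal_cons, hm, hd, ih (c / 6) (by omega) (by omega)]
        omega

theorem pvFlush_val (c : Int) (hc : 0 ≤ c) : pvVal (pvFlush c) = c :=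
  pvFlush_val_aux c.toNat c le_rfl hc

theorem pvFlush_bound_aux : ∀ (n : Nat) (c : Int), c.toNat ≤ n →
    ∀ d ∈ pvFlush c, 0 ≤ d ∧ d < 6 := by
  intro n
  induction n with
  | zero =>
      intro c h1 d hd
      rw [pvFlush] at hd
      split_ifs at hd with h
      · simp at hd
      · exfalso; omega
  | succ n ih =>
      intro c h1 d hd
      rw [pvFlush] at hd
      split_ifs at hd with h
      · simp at hd
      · have hm := PySem.Int.mod_eq_emod_of_pos (a := c) (b := 6) (by norm_num)
        have hdv := PySem.Int.floordiv_eq_ediv_of_pos (a := c) (b := 6) (by norm_num)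
        rw [hm, hdv] at hd
        rcases List.mem_cons.1 hd with h' | h'
        · subst h'; omega
        · exact ih (c / 6) (by omega) d h'

theorem pvFlush_bound (c : Int) : ∀ d ∈ pvFlush c, 0 ≤ d ∧ d < 6 :=
  pvFlush_bound_aux c.toNat c le_rfl

-- the carry loop writes a digit list of value c + pvVal l, digits in [0, 6)
theorem pvCarryRun_val (l : List Int) : ∀ c : Int, 0 ≤ c → (∀ v ∈ l, 0 ≤ v) →
    pvVal (pvCarryRun c l) = c + pvVal l := by
  induction l with
  | nil => intro c hc _; simp only [pvCarryRun, pvVal_nil, pvFlush_val c hc]; ring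
  | cons v t ih =>
      intro c hc hl
      have hv : 0 ≤ v := hl v List.mem_cons_self
      have hm := PySem.Int.mod_eq_emod_of_pos (a := c + v) (b := 6) (by norm_num)
      have hd := PySem.Int.floordiv_eq_ediv_of_pos (a := c + v) (b := 6) (by norm_num)
      simp only [pvCarryRun, pvVal_cons, hm, hd]
      rw [ih ((c + v) / 6) (by omega) (fun u hu => hl u (List.mem_cons_of_mem _ hu))]
      have hP : pvVal (v :: t) = v + 6 * pvVal t := pvVal_cons v t
      omega

theorem pvCarryRun_bound (l : List Int) : ∀ c : Int, 0 ≤ c → (∀ v ∈ l, 0 ≤ v) →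
    ∀ d ∈ pvCarryRun c l, 0 ≤ d ∧ d < 6 := by
  induction l with
  | nil => intro c _ _ d hd; exact pvFlush_bound c d hd
  | cons v t ih =>
      intro c hc hl d hd
      have hv : 0 ≤ v := hl v List.mem_cons_self
      have hm := PySem.Int.mod_eq_emod_of_pos (a := c + v) (b := 6) (by norm_num)
      have hdv := PySem.Int.floordiv_eq_ediv_of_pos (a := c + v) (b := 6) (by norm_num)
      simp only [pvCarryRun, hm, hdv] at hd
      rcases List.mem_cons.1 hd with h' | h'
      · subst h'; omega
      · exact ih ((c + v) / 6) (by omega)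
          (fun u hu => hl u (List.mem_cons_of_mem _ hu)) d h'

-- uniqueness: stripping trailing zeros of a bounded digit list gives the canonical digits
theorem pvStrip0_eq_flush (l : List Int) (h : ∀ d ∈ l, 0 ≤ d ∧ d < 6) :
    pvStrip0 l = pvFlush (pvVal l) := by
  induction l with
  | nil => rw [pvVal_nil, pvFlush_eq_nil 0 le_rfl]; rfl
  | cons d t ih =>
      have hd := h d List.mem_cons_self
      have ht : ∀ x ∈ t, 0 ≤ x ∧ x < 6 := fun x hx => h x (List.mem_cons_of_mem _ hx)
      have hvt : 0 ≤ pvVal t := pvVal_nonneg t (fun x hx => (ht x hx).1)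
      have ihs : pvStrip0 t = pvFlush (pvVal t) := ih ht
      rw [pvVal_cons]
      by_cases hs : pvStrip0 t = []
      · have hv0 : pvVal t = 0 := by
          by_contra hne
          exact pvFlush_ne_nil (pvVal t) (by omega) (ihs ▸ hs)
        simp only [pvStrip0, hs, ne_eq, not_true_eq_false, if_false]
        rw [hv0]
        by_cases hd0 : d = 0
        · simp only [hd0, if_true]
          rw [show (0:Int) + 6 * 0 = 0 by ring, pvFlush_eq_nil 0 le_rfl]
        · simp only [hd0, if_false]
          rw [show d + 6 * 0 = d by ring, pvFlush]
          rw [dif_neg (by omega)]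
          have hm := PySem.Int.mod_eq_emod_of_pos (a := d) (b := 6) (by norm_num)
          have hdv := PySem.Int.floordiv_eq_ediv_of_pos (a := d) (b := 6) (by norm_num)
          rw [hm, hdv, show d % 6 = d by omega, show d / 6 = 0 by omega,
            pvFlush_eq_nil 0 le_rfl]
      · have hvpos : 0 < pvVal t := by
          rcases lt_or_eq_of_le hvt with h' | h'
          · exact h'
          · exfalso; exact hs (ihs.trans (pvFlush_eq_nil _ (by omega)))
        simp only [pvStrip0, hs, ne_eq, not_false_eq_true, if_true]
        rw [ihs]
        conv_rhs => rw [pvFlush]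
        rw [dif_neg (by omega)]
        have hm := PySem.Int.mod_eq_emod_of_pos (a := d + 6 * pvVal t) (b := 6) (by norm_num)
        have hdv := PySem.Int.floordiv_eq_ediv_of_pos (a := d + 6 * pvVal t) (b := 6) (by norm_num)
        rw [hm, hdv, show (d + 6 * pvVal t) % 6 = d by omega,
          show (d + 6 * pvVal t) / 6 = pvVal t by omega]

-- A's output loop is the flush loop rendered as digit characters
theorem ndomLoopA_eq_flush : ∀ (n : Nat) (t2 : List Char),
    ndomLoopA n t2 = t2 ++ (pvFlush (n : Int)).map (fun d => pvDigitChar d.toNat) := by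
  intro n
  induction n using Nat.strong_induction_on with
  | _ n ih =>
      intro t2
      rw [ndomLoopA]
      split_ifs with h
      · subst h
        rw [Nat.cast_zero, pvFlush_eq_nil 0 le_rfl]
        simp
      · rw [ih (n / 6) (Nat.div_lt_self (Nat.pos_of_ne_zero h) (by norm_num))]
        conv_rhs => rw [pvFlush]
        rw [dif_neg (by omega)]
        have hm := PySem.Int.mod_eq_emod_of_pos (a := (n : Int)) (b := 6) (by norm_num)
        have hdv := PySem.Int.floordiv_eq_ediv_of_pos (a := (n : Int)) (b := 6) (by norm_num)
        rw [hm, hdv, show ((n : Int)) / 6 = ((n / 6 : Nat) : Int) by omega]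
        simp only [List.map_cons]
        rw [show ((n : Int) % 6).toNat = n % 6 by omega]
        simp

-- str(d) for one base-6 digit is its single character
theorem toChars_single_digit (d : Int) (h0 : 0 ≤ d) (h6 : d < 6) :
    PySem.Int.toChars d = [pvDigitChar d.toNat] := by
  interval_cases d <;> decide

theorem flatMap_toChars (l : List Int) (h : ∀ d ∈ l, 0 ≤ d ∧ d < 6) :
    l.flatMap (fun d => PySem.Int.toChars d) = l.map (fun d => pvDigitChar d.toNat) := by
  induction l with
  | nil => rfl
  | cons d t ih =>
      have hd := h d List.mem_cons_self
      simp only [List.flatMap_cons, List.map_cons,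
        toChars_single_digit d hd.1 hd.2,
        ih (fun x hx => h x (List.mem_cons_of_mem _ hx))]
      rfl

-- ===== VERDICT (by name: the statement is the Claim_ definition above) =====
theorem ndom_multiply_spec : Claim_equal_ndom_multiply := by
  intro a b _ hpre
  obtain ⟨ha, hb⟩ := hpre
  show ndom_multiply a b = ndom_multiply_alt a b
  simp only [ndom_multiply, ndom_multiply_alt]
  rw [foldA_eq_parse, foldA_eq_parse]
  simp only [zero_add]
  rw [parse_eq_val, parse_eq_val]
  set ra := (((PySem.Int.toStr a).toList).map pvDigitVal).reverse with hra
  set rb := (((PySem.Int.toStr b).toList).map pvDigitVal).reverse with hrb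
  have hraN : ∀ x ∈ ra, 0 ≤ x := by
    intro x hx
    rw [hra, List.mem_reverse] at hx
    rcases List.mem_map.1 hx with ⟨c, hc, rfl⟩
    exact toStr_digit_nonneg a ha c hc
  have hrbN : ∀ x ∈ rb, 0 ≤ x := by
    intro x hx
    rw [hrb, List.mem_reverse] at hx
    rcases List.mem_map.1 hx with ⟨c, hc, rfl⟩
    exact toStr_digit_nonneg b hb c hc
  have hconvN : ∀ z ∈ pvPolyMul ra rb, 0 ≤ z := pvPolyMul_nonneg ra rb hraN hrbN
  have htot : pvVal ra * pvVal rb = pvVal (pvPolyMul ra rb) := (pvVal_polyMul ra rb).symm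
  have htotN : 0 ≤ pvVal (pvPolyMul ra rb) := pvVal_nonneg _ hconvN
  have hbound : ∀ d ∈ pvCarryRun 0 (pvPolyMul ra rb), 0 ≤ d ∧ d < 6 :=
    pvCarryRun_bound _ 0 le_rfl hconvN
  have hstrip : pvStrip0 (pvCarryRun 0 (pvPolyMul ra rb))
      = pvFlush (pvVal (pvPolyMul ra rb)) := by
    rw [pvStrip0_eq_flush _ hbound, pvCarryRun_val _ 0 le_rfl hconvN, zero_add]
  rw [htot, ndomLoopA_eq_flush, Int.toNat_of_nonneg htotN, hstrip, List.nil_append]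
  rw [flatMap_toChars _ (fun d hd => pvFlush_bound _ d (List.mem_reverse.1 hd))]
  rw [List.map_reverse]
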